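-- pv_equiv track=rewrite | github.com/Laminecode/Projet_NLP | src/lexicale_analysis/assymetry.py | contextual_asymmetry
-- ===== SOURCE A (Python) =====
-- from typing import Counter
--
-- PALESTINE_WORDS = ["palestinian", "palestine", "gazans", "hamas"]
--
-- ISRAEL_WORDS = ["israeli", "israel", "idf", "netanyahu"]
--
-- def contextual_asymmetry(docs, window=3):
--     """
--     Cherche les mots qui apparaissent dans le voisinage
--     de Palestinian* vs Israeli*.
--     """
--     assoc_P = Counter()
--     assoc_I = Counter()
--
--     for lemmas in docs:
--         n = len(lemmas)
--         for i, w in enumerate(lemmas):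
--
--             if w in PALESTINE_WORDS:
--                 for j in range(max(0, i-window), min(n, i+window+1)):
--                     if j != i:
--                         assoc_P[lemmas[j]] += 1
--
--             if w in ISRAEL_WORDS:
--                 for j in range(max(0, i-window), min(n, i+window+1)):
--                     if j != i:
--                         assoc_I[lemmas[j]] += 1
--
--     return assoc_P.most_common(30), assoc_I.most_common(30)
-- ===== SOURCE B (Python) =====
-- from typing import Counter
--
-- PALESTINE_WORDS = ["palestinian", "palestine", "gazans", "hamas"]
--
-- ISRAEL_WORDS = ["israeli", "israel", "idf", "netanyahu"]
--
-- def contextual_asymmetry(docs, window=3):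
--     """
--     Inverted traversal: for every position j, count the anchor occurrences
--     inside its window via prefix sums, and add that count for the word at j.
--     """
--     pal = set(PALESTINE_WORDS)
--     isr = set(ISRAEL_WORDS)
--     assoc_P = Counter()
--     assoc_I = Counter()
--
--     for lemmas in docs:
--         n = len(lemmas)
--         isP = [1 if w in pal else 0 for w in lemmas]
--         isI = [1 if w in isr else 0 for w in lemmas]
--         prefP = [0]
--         for p in isP:
--             prefP.append(prefP[-1] + p)
--         prefI = [0]
--         for q in isI:
--             prefI.append(prefI[-1] + q)
--         for j, w in enumerate(lemmas):
--             lo = max(0, j - window)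
--             hi = min(n, j + window + 1)
--             if lo < hi:
--                 cP = prefP[hi] - prefP[lo] - isP[j]
--                 if cP:
--                     assoc_P[w] += cP
--                 cI = prefI[hi] - prefI[lo] - isI[j]
--                 if cI:
--                     assoc_I[w] += cI
--
--     return assoc_P.most_common(30), assoc_I.most_common(30)
-- ===== Notes on version B (the rewrite author's own statement) =====
-- stated objective: alternative
-- what changed: B inverts A's center-then-neighbors traversal: instead of scanning the window of every anchor occurrence and incrementing each neighbor by 1, B makes one pass per document with prefix sums of anchor indicators and, for every position j, adds in one step the number of anchors inside j's window to the count of the word at j. Pre_ excludes docs in which two same-side anchor words occur within `window` of each other, where the Counter key-insertion order (hence the most_common tie order) is an accident of A's traversal order.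
import Mathlib
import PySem

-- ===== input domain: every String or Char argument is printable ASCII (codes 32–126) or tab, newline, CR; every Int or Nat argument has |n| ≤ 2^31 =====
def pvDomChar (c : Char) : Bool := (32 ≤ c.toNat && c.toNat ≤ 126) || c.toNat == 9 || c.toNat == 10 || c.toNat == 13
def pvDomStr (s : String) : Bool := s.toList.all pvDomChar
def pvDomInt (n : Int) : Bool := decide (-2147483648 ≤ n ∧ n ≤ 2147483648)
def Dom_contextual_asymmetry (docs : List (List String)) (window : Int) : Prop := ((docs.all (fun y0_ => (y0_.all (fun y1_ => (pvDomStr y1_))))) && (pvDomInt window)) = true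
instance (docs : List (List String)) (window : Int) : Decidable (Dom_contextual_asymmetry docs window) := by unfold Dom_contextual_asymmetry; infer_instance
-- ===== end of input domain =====

-- B replaces A's center-then-neighbors window scan by an inverted one-pass-per-document
-- traversal with prefix sums of anchor indicators (one batched count per position);
-- equivalence of the returned value is proved on Pre_ below.

-- ===== PORT A =====
def palWords : List String := ["palestinian", "palestine", "gazans", "hamas"]

def israWords : List String := ["israeli", "israel", "idf", "netanyahu"]

-- inner 'for j in range(max(0,i-window), min(n,i+window+1)): if j != i: assoc[lemmas[j]] += 1'
def innerA (lemmas : List String) (n window i : Int) (d : PySem.Dict String Int) : PySem.Dict String Int :=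
  (PySem.List.pyRange (max 0 (i - window)) (min n (i + window + 1))).foldl
    (fun d j => if j ≠ i then d.modify (PySem.List.pyGetD lemmas j "") 0 (· + 1) else d) d

-- body of 'for lemmas in docs'
def docStepA (window : Int) (acc : PySem.Dict String Int × PySem.Dict String Int)
    (lemmas : List String) : PySem.Dict String Int × PySem.Dict String Int :=
  let n := PySem.List.len lemmas
  (PySem.List.enumerate lemmas).foldl
    (fun acc iw =>
      let acc1 := if palWords.contains iw.2 then (innerA lemmas n window iw.1 acc.1, acc.2) else acc
      if israWords.contains iw.2 then (acc1.1, innerA lemmas n window iw.1 acc1.2) else acc1)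
    acc

-- Counter.most_common(30) = heapq.nlargest(30, items, key=count) = stable reverse sort by count, first 30
def mostCommon30 (d : PySem.Dict String Int) : List (String × Int) :=
  (PySem.List.sorted d.items (fun p => p.2) true).take 30

def contextual_asymmetry (docs : List (List String)) (window : Int) :
    (List (String × Int)) × (List (String × Int)) :=
  let r := docs.foldl (docStepA window) (PySem.Dict.empty, PySem.Dict.empty)
  (mostCommon30 r.1, mostCommon30 r.2)

-- ===== PORT B =====
-- 'prefX = [0]; for p in flags: prefX.append(prefX[-1] + p)'
def prefixSums (flags : List Int) : List Int :=
  flags.foldl (fun acc p => acc ++ [PySem.List.pyGetD acc (-1) 0 + p]) [0]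

-- body of 'for lemmas in docs' in B: indicator lists, prefix sums, then one batched
-- window count per position j
def docStepB (window : Int) (acc : PySem.Dict String Int × PySem.Dict String Int)
    (lemmas : List String) : PySem.Dict String Int × PySem.Dict String Int :=
  let n := PySem.List.len lemmas
  let isP := lemmas.map (fun w => if (PySem.Set.ofList palWords).contains w then (1 : Int) else 0)
  let isI := lemmas.map (fun w => if (PySem.Set.ofList israWords).contains w then (1 : Int) else 0)
  let prefP := prefixSums isP
  let prefI := prefixSums isI
  (PySem.List.enumerate lemmas).foldl
    (fun acc jw =>
      let lo := max 0 (jw.1 - window)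
      let hi := min n (jw.1 + window + 1)
      if lo < hi then
        let cP := PySem.List.pyGetD prefP hi 0 - PySem.List.pyGetD prefP lo 0 - PySem.List.pyGetD isP jw.1 0
        let acc1 := if cP ≠ 0 then (acc.1.modify jw.2 0 (· + cP), acc.2) else acc
        let cI := PySem.List.pyGetD prefI hi 0 - PySem.List.pyGetD prefI lo 0 - PySem.List.pyGetD isI jw.1 0
        if cI ≠ 0 then (acc1.1, acc1.2.modify jw.2 0 (· + cI)) else acc1
      else acc)
    acc

def contextual_asymmetry_alt (docs : List (List String)) (window : Int) :
    (List (String × Int)) × (List (String × Int)) :=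
  let r := docs.foldl (docStepB window) (PySem.Dict.empty, PySem.Dict.empty)
  (mostCommon30 r.1, mostCommon30 r.2)

-- ===== PRECONDITION & SPEC =====
-- Pre_ excludes docs in which two anchor words of the SAME side occur within `window`
-- of each other: there the Counter key-insertion order (hence the most_common tie order)
-- is an accident of A's traversal order, and A's and B's tie orders are both defensible.
def Pre_contextual_asymmetry (docs : List (List String)) (window : Int) : Prop :=
  ∀ lemmas ∈ docs, ∀ i ∈ PySem.List.pyRange 0 lemmas.length,
    ∀ j ∈ PySem.List.pyRange 0 lemmas.length,
      i < j → j - i ≤ window →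
        ¬((PySem.List.pyGetD lemmas i "" ∈ palWords ∧ PySem.List.pyGetD lemmas j "" ∈ palWords) ∨
          (PySem.List.pyGetD lemmas i "" ∈ israWords ∧ PySem.List.pyGetD lemmas j "" ∈ israWords))
instance (docs : List (List String)) (window : Int) : Decidable (Pre_contextual_asymmetry docs window) := by
  unfold Pre_contextual_asymmetry; infer_instance

def pvWitness_contextual_asymmetry : List (List String) × Int := ([["hamas", "x", "israel"]], 1)

def Spec_contextual_asymmetry (docs : List (List String)) (window : Int)
    (out : (List (String × Int)) × (List (String × Int))) : Prop :=
  out = contextual_asymmetry_alt docs window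
instance (docs : List (List String)) (window : Int) (out : (List (String × Int)) × (List (String × Int))) :
    Decidable (Spec_contextual_asymmetry docs window out) := by
  unfold Spec_contextual_asymmetry; infer_instance

-- ===== CLAIM (what is proved, stated in full; the proofs are below) =====
def Claim_equal_contextual_asymmetry : Prop :=
  ∀ (docs : List (List String)) (window : Int), Dom_contextual_asymmetry docs window →
    Pre_contextual_asymmetry docs window →
      Spec_contextual_asymmetry docs window (contextual_asymmetry docs window)

-- ===== LEMMAS AND PROOFS =====

-- ---- proof-side vocabulary ----
def wAt (lemmas : List String) (j : Int) : String := PySem.List.pyGetD lemmas j ""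

def winL (n window i : Int) : List Int :=
  (PySem.List.pyRange (max 0 (i - window)) (min n (i + window + 1))).filter (fun j => decide (j ≠ i))

def cntN (tgt : String → Bool) (lemmas : List String) (window j : Int) : Nat :=
  (winL (lemmas.length : Int) window j).countP (fun i => tgt (wAt lemmas i))

def posA (tgt : String → Bool) (lemmas : List String) (window : Int) : List Int :=
  ((PySem.List.pyRange 0 (lemmas.length : Int)).filter (fun i => tgt (wAt lemmas i))).flatMap
    (winL (lemmas.length : Int) window)

def posB (tgt : String → Bool) (lemmas : List String) (window : Int) : List Int :=
  (PySem.List.pyRange 0 (lemmas.length : Int)).flatMap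
    (fun j => List.replicate (cntN tgt lemmas window j) j)

def goodPos (tgt : String → Bool) (lemmas : List String) (window : Int) : List Int :=
  (PySem.List.pyRange 0 (lemmas.length : Int)).filter (fun j => decide (cntN tgt lemmas window j ≠ 0))

def tgtP (w : String) : Bool := palWords.contains w
def tgtI (w : String) : Bool := israWords.contains w

def SepSide (tgt : String → Bool) (lemmas : List String) (window : Int) : Prop :=
  ∀ i1 i2 : Int, 0 ≤ i1 → i1 < i2 → i2 < (lemmas.length : Int) →
    tgt (wAt lemmas i1) → tgt (wAt lemmas i2) → window < i2 - i1

def sideA (tgt : String → Bool) (lemmas : List String) (window : Int)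
    (d : PySem.Dict String Int) : PySem.Dict String Int :=
  (PySem.List.enumerate lemmas).foldl
    (fun d iw => if tgt iw.2 then innerA lemmas (PySem.List.len lemmas) window iw.1 d else d) d

def sideB (tgt : String → Bool) (lemmas : List String) (window : Int)
    (d : PySem.Dict String Int) : PySem.Dict String Int :=
  (PySem.List.pyRange 0 (lemmas.length : Int)).foldl
    (fun d j => if cntN tgt lemmas window j ≠ 0
      then d.modify (wAt lemmas j) 0 (· + (cntN tgt lemmas window j : Int)) else d) d

-- ---- generic list lemmas ----
theorem foldl_flatMap {α β δ : Type} (g : α → List β) (f : δ → β → δ) (l : List α) (b : δ) :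
    (l.flatMap g).foldl f b = l.foldl (fun b x => (g x).foldl f b) b := by
  induction l generalizing b with
  | nil => rfl
  | cons x t ih => simp [List.flatMap_cons, List.foldl_append, ih]

theorem countP_flatMap {α β : Type} (p : β → Bool) (g : α → List β) (l : List α) :
    (l.flatMap g).countP p = (l.map (fun x => (g x).countP p)).sum := by
  induction l with
  | nil => rfl
  | cons x t ih => simp [List.flatMap_cons, List.countP_append, ih]

theorem sum_swap_list {α β : Type} (F : α → β → Nat) (l1 : List α) (l2 : List β) :
    (l1.map (fun a => (l2.map (F a)).sum)).sum = (l2.map (fun b => (l1.map (fun a => F a b)).sum)).sum := by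
  induction l1 with
  | nil => simp
  | cons x t ih => simp [ih, List.sum_map_add]

theorem sum_map_filter {α : Type} (p : α → Bool) (f : α → Nat) (l : List α) :
    ((l.filter p).map f).sum = (l.map (fun x => if p x then f x else 0)).sum := by
  induction l with
  | nil => rfl
  | cons x t ih => by_cases h : p x <;> simp [List.filter_cons, h, ih]

-- ---- PySem.Set layer ----
theorem set_add_of_mem {α : Type} [BEq α] [LawfulBEq α] {s : PySem.Set α} {x : α}
    (h : x ∈ s) : s.add x = s := by
  simp [PySem.Set.add, PySem.Set.contains, List.contains_iff_mem, h]

theorem set_add_of_not_mem {α : Type} [BEq α] [LawfulBEq α] {s : PySem.Set α} {x : α}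
    (h : ¬ x ∈ s) : s.add x = s ++ [x] := by
  simp [PySem.Set.add, PySem.Set.contains, List.contains_iff_mem, h]

theorem set_update_append {α : Type} [BEq α] (s : PySem.Set α) (xs ys : List α) :
    PySem.Set.update s (xs ++ ys) = PySem.Set.update (PySem.Set.update s xs) ys := by
  simp [PySem.Set.update, List.foldl_append]

theorem set_ofList_append {α : Type} [BEq α] (xs ys : List α) :
    PySem.Set.ofList (xs ++ ys) = PySem.Set.update (PySem.Set.ofList xs) ys := by
  simp [PySem.Set.ofList, PySem.Set.update, List.foldl_append]

theorem set_update_singleton {α : Type} [BEq α] (s : PySem.Set α) (x : α) :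
    PySem.Set.update s [x] = s.add x := rfl

theorem set_char_update {α : Type} [BEq α] [LawfulBEq α] (l : List α) (s : PySem.Set α) :
    PySem.Set.update s l = s ++ PySem.Set.ofList (l.filter (fun x => !s.contains x)) := by
  induction l using List.reverseRecOn with
  | nil => simp [PySem.Set.update, PySem.Set.ofList, PySem.Set.empty]
  | append_singleton t x ih =>
    rw [set_update_append, set_update_singleton, ih, List.filter_append]
    by_cases hxs : x ∈ s
    · have hfilt : List.filter (fun y => !s.contains y) [x] = [] := by
        simp [PySem.Set.contains, List.contains_iff_mem, hxs]
      rw [hfilt, List.append_nil]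
      exact set_add_of_mem (List.mem_append_left _ hxs)
    · have hfilt : List.filter (fun y => !s.contains y) [x] = [x] := by
        simp [PySem.Set.contains, List.contains_iff_mem, hxs]
      rw [hfilt, set_ofList_append, set_update_singleton]
      by_cases hxo : x ∈ PySem.Set.ofList (t.filter fun y => !s.contains y)
      · rw [set_add_of_mem (List.mem_append_right _ hxo), set_add_of_mem hxo]
      · rw [set_add_of_not_mem (by
            intro hc
            rcases List.mem_append.mp hc with h | h
            · exact hxs h
            · exact hxo h),
          set_add_of_not_mem hxo, List.append_assoc]

theorem set_ofList_of_nodup {α : Type} [BEq α] [LawfulBEq α] {l : List α} (h : l.Nodup) :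
    PySem.Set.ofList l = l := by
  induction l using List.reverseRecOn with
  | nil => rfl
  | append_singleton t x ih =>
    have hx : ¬ x ∈ t := by
      intro hm; exact (List.disjoint_of_nodup_append h) hm (List.mem_singleton_self x)
    have ht : t.Nodup := (List.nodup_append.mp h).1
    have : ¬ x ∈ PySem.Set.ofList t := by
      rw [PySem.Set.mem_ofList]; exact hx
    rw [set_ofList_append, PySem.Set.update, List.foldl_cons, List.foldl_nil,
      set_add_of_not_mem this, ih ht]

theorem set_ofList_filter {α : Type} [BEq α] [LawfulBEq α] (p : α → Bool) (l : List α) :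
    PySem.Set.ofList (l.filter p) = (PySem.Set.ofList l).filter p := by
  induction l using List.reverseRecOn with
  | nil => rfl
  | append_singleton t x ih =>
    rw [List.filter_append, set_ofList_append t [x], set_update_singleton]
    by_cases hp : p x
    · have hfx : List.filter p [x] = [x] := by simp [hp]
      rw [hfx, set_ofList_append, set_update_singleton, ih]
      by_cases hm : x ∈ PySem.Set.ofList t
      · have hmf : x ∈ (PySem.Set.ofList t).filter p := List.mem_filter.mpr ⟨hm, hp⟩
        rw [set_add_of_mem hm, set_add_of_mem hmf]
      · have hmf : ¬ x ∈ (PySem.Set.ofList t).filter p := fun hc => hm (List.mem_of_mem_filter hc)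
        rw [set_add_of_not_mem hm, set_add_of_not_mem hmf, List.filter_append]
        simp [hp]
    · have hp' : p x = false := by simpa using hp
      have hfx : List.filter p [x] = [] := by simp [hp']
      rw [hfx, List.append_nil, ih]
      by_cases hm : x ∈ PySem.Set.ofList t
      · rw [set_add_of_mem hm]
      · rw [set_add_of_not_mem hm, List.filter_append]
        simp [hp']

theorem set_ofList_map_ofList {α β : Type} [BEq α] [LawfulBEq α] [BEq β] [LawfulBEq β]
    (f : α → β) (l : List α) :
    PySem.Set.ofList (l.map f) = PySem.Set.ofList ((PySem.Set.ofList l).map f) := by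
  induction l using List.reverseRecOn with
  | nil => rfl
  | append_singleton t x ih =>
    have hmap : (t ++ [x]).map f = t.map f ++ [f x] := by simp
    rw [hmap, set_ofList_append, set_update_singleton, set_ofList_append t [x],
      set_update_singleton]
    by_cases hm : x ∈ PySem.Set.ofList t
    · have hfx : f x ∈ PySem.Set.ofList (t.map f) := by
        rw [PySem.Set.mem_ofList] at hm ⊢
        exact List.mem_map_of_mem hm
      rw [set_add_of_mem hm, set_add_of_mem hfx, ih]
    · rw [set_add_of_not_mem hm]
      have hmap2 : (PySem.Set.ofList t ++ [x]).map f = (PySem.Set.ofList t).map f ++ [f x] := by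
        simp
      rw [hmap2, set_ofList_append, set_update_singleton, ih]

theorem set_update_replicate {α : Type} [BEq α] [LawfulBEq α] (x : α)
    {m : Nat} (h : m ≠ 0) : ∀ s : PySem.Set α, PySem.Set.update s (List.replicate m x) = s.add x := by
  induction m with
  | zero => exact absurd rfl h
  | succ k ih =>
    intro s
    rw [List.replicate_succ]
    have hstep : PySem.Set.update s (x :: List.replicate k x)
        = PySem.Set.update (s.add x) (List.replicate k x) := rfl
    rw [hstep]
    by_cases hk : k = 0
    · subst hk; rfl
    · rw [ih hk (s.add x)]
      exact set_add_of_mem (by rw [PySem.Set.mem_add]; right; rfl)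

-- ---- Dict layer ----
theorem modify_modify_add (d : PySem.Dict String Int) (w : String) (a b : Int) :
    (d.modify w 0 (· + a)).modify w 0 (· + b) = d.modify w 0 (· + (a + b)) := by
  simp [PySem.Dict.modify, PySem.Dict.getD_insert_self, PySem.Dict.insert_insert_self,
    add_assoc]

theorem replicate_foldl_modify (m : Nat) (w : String) (d : PySem.Dict String Int) (h : m ≠ 0) :
    (List.replicate m w).foldl (fun d x => d.modify x 0 (· + 1)) d
      = d.modify w 0 (· + (m : Int)) := by
  induction m generalizing d with
  | zero => exact absurd rfl h
  | succ k ih =>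
    rw [List.replicate_succ, List.foldl_cons]
    by_cases hk : k = 0
    · subst hk; simp
    · rw [ih _ hk, modify_modify_add]
      congr 1
      funext v
      push_cast
      ring


theorem dict_eq_of_counts_ofList (W1 W2 : List String) (d : PySem.Dict String Int)
    (hc : ∀ w, W1.count w = W2.count w)
    (ho : PySem.Set.ofList W1 = PySem.Set.ofList W2)
    (hn : d.keys.Nodup) :
    W1.foldl (fun d x => d.modify x 0 (· + 1)) d = W2.foldl (fun d x => d.modify x 0 (· + 1)) d := by
  have hk1 := PySem.Dict.keys_foldl_modify (ν := Int) W1 0 (fun _ _ => (· + 1)) d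
  have hk2 := PySem.Dict.keys_foldl_modify (ν := Int) W2 0 (fun _ _ => (· + 1)) d
  have hkeys : (W1.foldl (fun d x => d.modify x 0 (· + 1)) d).keys
      = (W2.foldl (fun d x => d.modify x 0 (· + 1)) d).keys := by
    rw [hk1, hk2, set_char_update, set_char_update, set_ofList_filter, set_ofList_filter, ho]
  have hn1 : (W1.foldl (fun d x => d.modify x 0 (· + 1)) d).keys.Nodup :=
    PySem.Dict.nodup_keys_foldl_modify_key W1 (fun x => x) 0 (fun _ _ => (· + 1)) d hn
  have hn2 : (W2.foldl (fun d x => d.modify x 0 (· + 1)) d).keys.Nodup :=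
    PySem.Dict.nodup_keys_foldl_modify_key W2 (fun x => x) 0 (fun _ _ => (· + 1)) d hn
  apply PySem.Dict.ext
  rw [PySem.Dict.items_eq_map_keys _ hn1 0, PySem.Dict.items_eq_map_keys _ hn2 0, hkeys]
  apply List.map_congr_left
  intro k _
  rw [PySem.Dict.getD_foldl_modify_add_one, PySem.Dict.getD_foldl_modify_add_one, hc]

-- ---- the rest of the development ----
theorem innerA_eq (lemmas : List String) (window i : Int) (d : PySem.Dict String Int) :
    innerA lemmas (lemmas.length : Int) window i d
      = (winL (lemmas.length : Int) window i).foldl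
          (fun d j => d.modify (PySem.List.pyGetD lemmas j "") 0 (· + 1)) d := by
  unfold innerA winL
  rw [PySem.List.foldl_ite_eq_foldl_filter (p := fun j => j ≠ i)]

theorem sideA_eq_events (tgt : String → Bool) (lemmas : List String) (window : Int)
    (d : PySem.Dict String Int) :
    sideA tgt lemmas window d
      = ((posA tgt lemmas window).map (wAt lemmas)).foldl (fun d x => d.modify x 0 (· + 1)) d := by
  unfold sideA posA
  rw [PySem.List.enumerate_eq_map_pyRange lemmas "", List.foldl_map, List.foldl_map,
    foldl_flatMap]
  simp only [PySem.List.len_eq, wAt]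
  rw [PySem.List.foldl_if_eq_foldl_filter
    (p := fun j : Int => tgt (PySem.List.pyGetD lemmas j ""))
    (f := fun (d : PySem.Dict String Int) (j : Int) => innerA lemmas (lemmas.length : Int) window j d)]
  apply PySem.List.foldl_congr_mem
  intro acc x _
  rw [innerA_eq]

theorem prefixSums_append (t : List Int) (x : Int) :
    prefixSums (t ++ [x]) = prefixSums t ++ [PySem.List.pyGetD (prefixSums t) (-1) 0 + x] := by
  unfold prefixSums
  rw [List.foldl_append]
  rfl

theorem length_prefixSums (flags : List Int) : (prefixSums flags).length = flags.length + 1 := by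
  induction flags using List.reverseRecOn with
  | nil => rfl
  | append_singleton t x ih => rw [prefixSums_append, List.length_append, ih]; simp

theorem getElem?_prefixSums (flags : List Int) (k : Nat) (hk : k ≤ flags.length) :
    (prefixSums flags)[k]? = some ((flags.take k).sum) := by
  induction flags using List.reverseRecOn generalizing k with
  | nil =>
    have hk0 : k = 0 := by simpa using hk
    subst hk0
    rfl
  | append_singleton t x ih =>
    have hlen := length_prefixSums t
    rw [prefixSums_append]
    by_cases hk2 : k ≤ t.length
    · rw [List.getElem?_append_left (by omega), ih k hk2, List.take_append_of_le_length hk2]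
    · have hk3 : k = t.length + 1 := by
        rw [List.length_append, List.length_singleton] at hk
        omega
      subst hk3
      have hg := ih t.length le_rfl
      have hlast : PySem.List.pyGetD (prefixSums t) (-1) 0 = t.sum := by
        simp only [PySem.List.pyGetD, PySem.List.pyGet?, PySem.List.pyIdx?]
        rw [if_neg (by omega), if_pos (by push_cast; omega)]
        have hidx : (prefixSums t).length - ((-(-1 : Int)).toNat) = t.length := by
          rw [hlen]; simp
        rw [hidx]
        show ((prefixSums t)[t.length]?).getD 0 = t.sum
        rw [hg]
        simp [List.take_length]
      rw [List.getElem?_append_right (by omega), hlen, Nat.sub_self]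
      simp only [List.getElem?_cons_zero, hlast]
      rw [List.take_of_length_le (by simp)]
      simp

theorem pyGetD_prefixSums (flags : List Int) (k : Int) (h0 : 0 ≤ k) (h1 : k ≤ (flags.length : Int)) :
    PySem.List.pyGetD (prefixSums flags) k 0 = (flags.take k.toNat).sum := by
  have hlen := length_prefixSums flags
  simp only [PySem.List.pyGetD, PySem.List.pyGet?, PySem.List.pyIdx?]
  rw [if_pos h0, if_pos (by push_cast; omega)]
  show ((prefixSums flags)[k.toNat]?).getD 0 = _
  rw [getElem?_prefixSums flags k.toNat (by omega)]
  rfl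

theorem sideB_eq_events (tgt : String → Bool) (lemmas : List String) (window : Int)
    (d : PySem.Dict String Int) :
    sideB tgt lemmas window d
      = ((posB tgt lemmas window).map (wAt lemmas)).foldl (fun d x => d.modify x 0 (· + 1)) d := by
  unfold sideB posB
  rw [List.map_flatMap, foldl_flatMap]
  apply PySem.List.foldl_congr_mem
  intro acc j _
  rw [List.map_replicate]
  by_cases hc : cntN tgt lemmas window j = 0
  · rw [if_neg (by omega), hc, List.replicate_zero, List.foldl_nil]
  · rw [if_pos hc, replicate_foldl_modify _ _ _ hc]

theorem natsum_countP {α : Type} (p : α → Bool) (l : List α) :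
    (l.map (fun x => if p x then (1 : Nat) else 0)).sum = l.countP p := by
  induction l with
  | nil => rfl
  | cons x t ih => cases hp : p x <;> simp [List.countP_cons, hp, ih] <;> omega

theorem winL_countP_full (p : Int → Bool) (n window i : Int) :
    (winL n window i).countP p
      = ((PySem.List.pyRange 0 n).map (fun j =>
          if (max 0 (i - window) ≤ j ∧ j < min n (i + window + 1) ∧ j ≠ i) ∧ p j = true
          then (1 : Nat) else 0)).sum := by
  have hns : ((PySem.List.pyRange 0 n).map (fun j =>
      if (max 0 (i - window) ≤ j ∧ j < min n (i + window + 1) ∧ j ≠ i) ∧ p j = true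
      then (1 : Nat) else 0)).sum
      = (PySem.List.pyRange 0 n).countP (fun j =>
          decide ((max 0 (i - window) ≤ j ∧ j < min n (i + window + 1) ∧ j ≠ i) ∧ p j = true)) := by
    rw [← natsum_countP]
    apply congrArg
    apply List.map_congr_left
    intro j _
    simp only [decide_eq_true_eq]
  rw [hns]
  unfold winL
  by_cases hord : min n (i + window + 1) ≤ max 0 (i - window)
  · rw [PySem.List.pyRange_one_eq_nil hord, List.filter_nil, List.countP_nil]
    symm
    rw [List.countP_eq_zero]
    intro j hj
    simp only [decide_eq_true_eq]
    rintro ⟨⟨h1, h2, -⟩, -⟩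
    omega
  · have h1 : (0 : Int) ≤ max 0 (i - window) := by omega
    have h2 : max 0 (i - window) ≤ min n (i + window + 1) := by omega
    have h3 : min n (i + window + 1) ≤ n := by omega
    rw [PySem.List.pyRange_one_append 0 (max 0 (i - window)) n h1 (by omega),
      PySem.List.pyRange_one_append (max 0 (i - window)) (min n (i + window + 1)) n h2 h3,
      List.countP_append, List.countP_append]
    have hz1 : (PySem.List.pyRange 0 (max 0 (i - window))).countP (fun j =>
        decide ((max 0 (i - window) ≤ j ∧ j < min n (i + window + 1) ∧ j ≠ i) ∧ p j = true)) = 0 := by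
      rw [List.countP_eq_zero]
      intro j hj
      have := PySem.List.mem_pyRange_one.mp hj
      simp only [decide_eq_true_eq]
      rintro ⟨⟨h1', h2', -⟩, -⟩
      omega
    have hz2 : (PySem.List.pyRange (min n (i + window + 1)) n).countP (fun j =>
        decide ((max 0 (i - window) ≤ j ∧ j < min n (i + window + 1) ∧ j ≠ i) ∧ p j = true)) = 0 := by
      rw [List.countP_eq_zero]
      intro j hj
      have := PySem.List.mem_pyRange_one.mp hj
      simp only [decide_eq_true_eq]
      rintro ⟨⟨h1', h2', -⟩, -⟩
      omega
    have hmid : (PySem.List.pyRange (max 0 (i - window)) (min n (i + window + 1))).countP (fun j =>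
        decide ((max 0 (i - window) ≤ j ∧ j < min n (i + window + 1) ∧ j ≠ i) ∧ p j = true))
        = ((PySem.List.pyRange (max 0 (i - window)) (min n (i + window + 1))).filter
            (fun j => decide (j ≠ i))).countP p := by
      rw [List.countP_filter]
      apply List.countP_congr
      intro j hj
      have := PySem.List.mem_pyRange_one.mp hj
      simp only [decide_eq_true_eq, Bool.and_eq_true]
      constructor
      · rintro ⟨⟨-, -, hne⟩, hp⟩
        exact ⟨hp, by omega⟩
      · rintro ⟨hp, hne⟩
        exact ⟨⟨by omega, by omega, by omega⟩, hp⟩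
    rw [hz1, hz2, hmid]
    omega

theorem counts_eq (tgt : String → Bool) (lemmas : List String) (window : Int) (w : String) :
    ((posA tgt lemmas window).map (wAt lemmas)).count w
      = ((posB tgt lemmas window).map (wAt lemmas)).count w := by
  rw [List.count_eq_countP, List.count_eq_countP, List.countP_map, List.countP_map]
  simp only [Function.comp_def]
  unfold posA posB
  rw [countP_flatMap, countP_flatMap, sum_map_filter]
  trans ((PySem.List.pyRange 0 (lemmas.length : Int)).map (fun i =>
      ((PySem.List.pyRange 0 (lemmas.length : Int)).map (fun j =>
        if (max 0 (i - window) ≤ j ∧ j < min (lemmas.length : Int) (i + window + 1) ∧ j ≠ i)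
            ∧ tgt (wAt lemmas i) = true ∧ (wAt lemmas j == w) = true
        then (1 : Nat) else 0)).sum)).sum
  · apply congrArg
    apply List.map_congr_left
    intro i _
    by_cases ht : tgt (wAt lemmas i) = true
    · rw [if_pos ht, winL_countP_full (fun x => wAt lemmas x == w) (lemmas.length : Int) window i]
      apply congrArg
      apply List.map_congr_left
      intro j _
      by_cases hc : (max 0 (i - window) ≤ j ∧ j < min (lemmas.length : Int) (i + window + 1) ∧ j ≠ i)
          ∧ (wAt lemmas j == w) = true
      · rw [if_pos hc, if_pos ⟨hc.1, ht, hc.2⟩]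
      · rw [if_neg hc, if_neg (fun h => hc ⟨h.1, h.2.2⟩)]
    · rw [if_neg ht]
      symm
      apply List.sum_eq_zero
      intro x hx
      obtain ⟨j, -, rfl⟩ := List.mem_map.mp hx
      exact if_neg (fun h => ht h.2.1)
  · rw [sum_swap_list (fun i j =>
      if (max 0 (i - window) ≤ j ∧ j < min ((lemmas.length : Int)) (i + window + 1) ∧ j ≠ i)
          ∧ tgt (wAt lemmas i) = true ∧ (wAt lemmas j == w) = true then (1 : Nat) else 0)
      (PySem.List.pyRange 0 (lemmas.length : Int)) (PySem.List.pyRange 0 (lemmas.length : Int))]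
    apply congrArg
    apply List.map_congr_left
    intro j hj
    obtain ⟨hj0, hjn⟩ := PySem.List.mem_pyRange_one.mp hj
    rw [List.countP_replicate]
    beta_reduce
    by_cases hq : (wAt lemmas j == w) = true
    · rw [if_pos hq]
      unfold cntN
      rw [winL_countP_full (fun i => tgt (wAt lemmas i)) (lemmas.length : Int) window j]
      apply congrArg
      apply List.map_congr_left
      intro i hi
      obtain ⟨hi0, hin⟩ := PySem.List.mem_pyRange_one.mp hi
      by_cases hc : (max 0 (j - window) ≤ i ∧ i < min ((lemmas.length : Int)) (j + window + 1) ∧ i ≠ j)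
          ∧ tgt (wAt lemmas i) = true
      · obtain ⟨⟨ha, hb, hne⟩, ht2⟩ := hc
        have hLc : (max 0 (i - window) ≤ j ∧ j < min ((lemmas.length : Int)) (i + window + 1) ∧ j ≠ i)
            ∧ tgt (wAt lemmas i) = true ∧ (wAt lemmas j == w) = true :=
          ⟨⟨by omega, by omega, by omega⟩, ht2, hq⟩
        rw [if_pos hLc, if_pos ⟨⟨ha, hb, hne⟩, ht2⟩]
      · rw [if_neg hc, if_neg (by
          rintro ⟨⟨ha, hb, hne⟩, ht2, -⟩
          exact hc ⟨⟨by omega, by omega, by omega⟩, ht2⟩)]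
    · rw [if_neg hq]
      apply List.sum_eq_zero
      intro x hx
      obtain ⟨i, -, rfl⟩ := List.mem_map.mp hx
      exact if_neg (fun h => hq h.2.2)

theorem ofList_flatMap_replicate (c : Int → Nat) (l : List Int) (hnd : l.Nodup) :
    PySem.Set.ofList (l.flatMap (fun j => List.replicate (c j) j))
      = l.filter (fun j => decide (c j ≠ 0)) := by
  induction l using List.reverseRecOn with
  | nil => rfl
  | append_singleton t x ih =>
    have hx : ¬ x ∈ t := fun hm =>
      (List.disjoint_of_nodup_append hnd) hm (List.mem_singleton_self x)
    have ht : t.Nodup := (List.nodup_append.mp hnd).1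
    rw [List.flatMap_append, set_ofList_append, ih ht, List.filter_append]
    by_cases hc : c x = 0
    · simp [hc, PySem.Set.update]
    · have hrep : (List.flatMap (fun j => List.replicate (c j) j) [x]) = List.replicate (c x) x := by
        simp
      rw [hrep, set_update_replicate x hc]
      have hxf : ¬ x ∈ t.filter (fun j => decide (c j ≠ 0)) :=
        fun hm => hx (List.mem_of_mem_filter hm)
      rw [set_add_of_not_mem hxf]
      simp [hc]

theorem ofList_posB (tgt : String → Bool) (lemmas : List String) (window : Int) :
    PySem.Set.ofList (posB tgt lemmas window) = goodPos tgt lemmas window := by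
  unfold posB goodPos
  exact ofList_flatMap_replicate _ _ (PySem.List.nodup_pyRange_one _ _)

theorem mem_winL (n window i x : Int) :
    x ∈ winL n window i ↔ (max 0 (i - window) ≤ x ∧ x < min n (i + window + 1) ∧ x ≠ i) := by
  unfold winL
  rw [List.mem_filter, PySem.List.mem_pyRange_one]
  simp only [decide_eq_true_eq]
  constructor
  · rintro ⟨⟨h1, h2⟩, h3⟩
    exact ⟨h1, h2, h3⟩
  · rintro ⟨h1, h2, h3⟩
    exact ⟨⟨h1, h2⟩, h3⟩

theorem winL_nodup (n window i : Int) : (winL n window i).Nodup :=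
  List.Nodup.filter _ (PySem.List.nodup_pyRange_one _ _)

theorem winL_pairwise (n window i : Int) : (winL n window i).Pairwise (· < ·) :=
  List.Pairwise.filter _ (PySem.List.pairwise_lt_pyRange_one _ _)

theorem eq_of_sorted_mem {l1 l2 : List Int} (h1 : l1.Pairwise (· < ·))
    (h2 : l2.Pairwise (· < ·)) (hm : ∀ x, x ∈ l1 ↔ x ∈ l2) : l1 = l2 := by
  have hn1 : l1.Nodup := List.Pairwise.imp (fun h => ne_of_lt h) h1
  have hn2 : l2.Nodup := List.Pairwise.imp (fun h => ne_of_lt h) h2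
  have hperm : l1.Perm l2 := by
    apply List.perm_of_nodup_nodup_toFinset_eq hn1 hn2
    ext x
    simp only [List.mem_toFinset]
    exact hm x
  exact List.eq_of_perm_of_sorted
    (fun a b _ _ hab hba => absurd (lt_trans hab hba) (lt_irrefl a)) h1 h2 hperm

theorem sorted_ofList_blocks (n window : Int) (cs : List Int) :
    cs.Pairwise (· < ·) → (∀ i ∈ cs, 0 ≤ i ∧ i < n) →
    cs.Pairwise (fun a b => window < b - a) →
    (PySem.Set.ofList (cs.flatMap (winL n window))).Pairwise (· < ·) := by
  induction cs using List.reverseRecOn with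
  | nil => intro _ _ _; exact List.Pairwise.nil
  | append_singleton t x ih =>
    intro hsort hbound hsep
    obtain ⟨hsort_t, -, hcross_lt⟩ := List.pairwise_append.mp hsort
    obtain ⟨hsep_t, -, hcross_sep⟩ := List.pairwise_append.mp hsep
    rw [List.flatMap_append, set_ofList_append, set_char_update]
    have hone : List.flatMap (winL n window) [x] = winL n window x := by simp
    rw [hone]
    have hnd : ((winL n window x).filter
        (fun y => !(PySem.Set.ofList (t.flatMap (winL n window))).contains y)).Nodup :=
      List.Nodup.filter _ (winL_nodup n window x)
    rw [set_ofList_of_nodup hnd]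
    apply List.pairwise_append.mpr
    refine ⟨ih hsort_t (fun i hi => hbound i (by simp [hi])) hsep_t,
      List.Pairwise.filter _ (winL_pairwise n window x), ?_⟩
    intro a ha b hb
    obtain ⟨hbw, hbc⟩ := List.mem_filter.mp hb
    have hbS : ¬ b ∈ PySem.Set.ofList (t.flatMap (winL n window)) := by
      simpa [PySem.Set.contains, List.contains_iff_mem] using hbc
    rw [PySem.Set.mem_ofList] at ha
    obtain ⟨i', hi', haw⟩ := List.mem_flatMap.mp ha
    by_contra hba
    rw [not_lt] at hba
    have hxb := hbound x (by simp)
    have hib := hbound i' (by simp [hi'])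
    have hix : i' < x := hcross_lt i' hi' x (by simp)
    have hsepix : window < x - i' := hcross_sep i' hi' x (by simp)
    rw [mem_winL] at haw hbw
    have hbI : b ∈ winL n window i' := by
      rw [mem_winL]
      omega
    exact hbS (PySem.Set.mem_ofList _ _ |>.mpr (List.mem_flatMap.mpr ⟨i', hi', hbI⟩))

theorem ofList_posA (tgt : String → Bool) (lemmas : List String) (window : Int)
    (hsep : SepSide tgt lemmas window) :
    PySem.Set.ofList (posA tgt lemmas window) = goodPos tgt lemmas window := by
  unfold posA goodPos
  have hcent : ∀ i ∈ (PySem.List.pyRange 0 (lemmas.length : Int)).filter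
      (fun i => tgt (wAt lemmas i)), (0 ≤ i ∧ i < (lemmas.length : Int)) ∧ tgt (wAt lemmas i) := by
    intro i hi
    obtain ⟨hr, hp⟩ := List.mem_filter.mp hi
    exact ⟨PySem.List.mem_pyRange_one.mp hr, hp⟩
  apply eq_of_sorted_mem
  · apply sorted_ofList_blocks
    · exact List.Pairwise.filter _ (PySem.List.pairwise_lt_pyRange_one _ _)
    · exact fun i hi => (hcent i hi).1
    · apply List.Pairwise.imp_of_mem (R := (· < ·))
      · intro a b hma hmb hab
        exact hsep a b (hcent a hma).1.1 hab (hcent b hmb).1.2 (hcent a hma).2 (hcent b hmb).2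
      · exact List.Pairwise.filter _ (PySem.List.pairwise_lt_pyRange_one _ _)
  · exact List.Pairwise.filter _ (PySem.List.pairwise_lt_pyRange_one _ _)
  · intro x
    rw [PySem.Set.mem_ofList, List.mem_flatMap, List.mem_filter]
    constructor
    · rintro ⟨i, hi, hxw⟩
      obtain ⟨⟨hi0, hin⟩, hti⟩ := hcent i hi
      rw [mem_winL] at hxw
      refine ⟨PySem.List.mem_pyRange_one.mpr ⟨by omega, by omega⟩, ?_⟩
      simp only [decide_eq_true_eq]
      unfold cntN
      rw [← Nat.pos_iff_ne_zero, List.countP_pos_iff]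
      exact ⟨i, by rw [mem_winL]; omega, hti⟩
    · rintro ⟨hxr, hc⟩
      obtain ⟨hx0, hxn⟩ := PySem.List.mem_pyRange_one.mp hxr
      simp only [decide_eq_true_eq] at hc
      unfold cntN at hc
      rw [← Nat.pos_iff_ne_zero, List.countP_pos_iff] at hc
      obtain ⟨i, hiw, hti⟩ := hc
      rw [mem_winL] at hiw
      refine ⟨i, List.mem_filter.mpr ⟨PySem.List.mem_pyRange_one.mpr ⟨by omega, by omega⟩, hti⟩, ?_⟩
      rw [mem_winL]
      omega

theorem side_main (tgt : String → Bool) (lemmas : List String) (window : Int)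
    (d : PySem.Dict String Int) (hsep : SepSide tgt lemmas window) (hn : d.keys.Nodup) :
    sideA tgt lemmas window d = sideB tgt lemmas window d := by
  rw [sideA_eq_events, sideB_eq_events]
  apply dict_eq_of_counts_ofList _ _ _ (counts_eq tgt lemmas window) _ hn
  rw [set_ofList_map_ofList, set_ofList_map_ofList (l := posB tgt lemmas window),
    ofList_posA tgt lemmas window hsep, ofList_posB]

theorem sideA_nodup (tgt : String → Bool) (lemmas : List String) (window : Int)
    (d : PySem.Dict String Int) (hn : d.keys.Nodup) :
    (sideA tgt lemmas window d).keys.Nodup := by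
  rw [sideA_eq_events]
  exact PySem.Dict.nodup_keys_foldl_modify_key _ (fun x => x) 0 (fun _ _ => (· + 1)) d hn

theorem pairfold_splitA (lemmas : List String) (n window : Int) (l : List (Int × String)) :
    ∀ d1 d2 : PySem.Dict String Int,
      l.foldl (fun acc iw =>
        let acc1 := if palWords.contains iw.2 then (innerA lemmas n window iw.1 acc.1, acc.2) else acc
        if israWords.contains iw.2 then (acc1.1, innerA lemmas n window iw.1 acc1.2) else acc1)
        (d1, d2)
      = (l.foldl (fun d iw => if tgtP iw.2 then innerA lemmas n window iw.1 d else d) d1,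
         l.foldl (fun d iw => if tgtI iw.2 then innerA lemmas n window iw.1 d else d) d2) := by
  induction l with
  | nil => intro d1 d2; rfl
  | cons x t ih =>
    intro d1 d2
    simp only [List.foldl_cons, tgtP, tgtI]
    by_cases h1 : palWords.contains x.2 <;> by_cases h2 : israWords.contains x.2 <;>
      simp only [h1, h2, if_true, if_false, ite_true, ite_false] <;> exact ih _ _

theorem docStepA_split (window : Int) (d1 d2 : PySem.Dict String Int) (lemmas : List String) :
    docStepA window (d1, d2) lemmas = (sideA tgtP lemmas window d1, sideA tgtI lemmas window d2) := by
  unfold docStepA sideA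
  exact pairfold_splitA lemmas (PySem.List.len lemmas) window (PySem.List.enumerate lemmas) d1 d2

theorem take_map_pyGetD (lemmas : List String) (k : Int) (h0 : 0 ≤ k) (h1 : k ≤ (lemmas.length : Int)) :
    lemmas.take k.toNat = (PySem.List.pyRange 0 k).map (fun j => PySem.List.pyGetD lemmas j "") := by
  have hfull := PySem.List.map_pyGetD_pyRange_zero lemmas ""
  rw [PySem.List.len_eq] at hfull
  conv_lhs => rw [← hfull, PySem.List.pyRange_one_append 0 k (lemmas.length : Int) h0 h1,
    List.map_append]
  rw [List.take_left' (by rw [List.length_map, PySem.List.length_pyRange_one]; omega)]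

theorem takeSum (tgt : String → Bool) (lemmas : List String) (k : Int) (h0 : 0 ≤ k)
    (h1 : k ≤ (lemmas.length : Int)) :
    ((lemmas.map (fun w => if tgt w then (1 : Int) else 0)).take k.toNat).sum
      = ((PySem.List.pyRange 0 k).countP (fun i => tgt (PySem.List.pyGetD lemmas i "")) : Int) := by
  rw [← List.map_take, PySem.List.sum_map_ite_one_zero, take_map_pyGetD lemmas k h0 h1,
    List.countP_map]
  rfl

theorem winL_countP_split (p : Int → Bool) (n window j : Int) (h0 : 0 ≤ j) (hn : j < n)
    (hlt : max 0 (j - window) < min n (j + window + 1)) :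
    (PySem.List.pyRange (max 0 (j - window)) (min n (j + window + 1))).countP p
      = (winL n window j).countP p + (if p j then 1 else 0) := by
  have h1 : max 0 (j - window) ≤ j := by omega
  have h2 : j < min n (j + window + 1) := by omega
  unfold winL
  rw [PySem.List.pyRange_one_append (max 0 (j - window)) j (min n (j + window + 1)) h1 (le_of_lt h2),
    PySem.List.pyRange_one_cons h2, List.filter_append, List.filter_cons]
  have hfl : (PySem.List.pyRange (max 0 (j - window)) j).filter (fun x => decide (x ≠ j))
      = PySem.List.pyRange (max 0 (j - window)) j := by
    apply List.filter_eq_self.mpr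
    intro x hx
    have := PySem.List.mem_pyRange_one.mp hx
    simp only [decide_eq_true_eq]
    omega
  have hfr : (PySem.List.pyRange (j + 1) (min n (j + window + 1))).filter (fun x => decide (x ≠ j))
      = PySem.List.pyRange (j + 1) (min n (j + window + 1)) := by
    apply List.filter_eq_self.mpr
    intro x hx
    have := PySem.List.mem_pyRange_one.mp hx
    simp only [decide_eq_true_eq]
    omega
  rw [if_neg (by simp), hfl, hfr, List.countP_append, List.countP_append, List.countP_cons]
  cases hp : p j <;> simp [hp] <;> omega

theorem cnt_arith (tgt : String → Bool) (h00 : tgt "" = false) (lemmas : List String)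
    (window j : Int) (h0 : 0 ≤ j) (hn : j < (lemmas.length : Int))
    (hlt : max 0 (j - window) < min (lemmas.length : Int) (j + window + 1)) :
    PySem.List.pyGetD (prefixSums (lemmas.map (fun w => if tgt w then (1 : Int) else 0)))
        (min (lemmas.length : Int) (j + window + 1)) 0
      - PySem.List.pyGetD (prefixSums (lemmas.map (fun w => if tgt w then (1 : Int) else 0)))
        (max 0 (j - window)) 0
      - PySem.List.pyGetD (lemmas.map (fun w => if tgt w then (1 : Int) else 0)) j 0
    = (cntN tgt lemmas window j : Int) := by
  have hlen : ((lemmas.map (fun w => if tgt w then (1 : Int) else 0)).length : Int)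
      = (lemmas.length : Int) := by rw [List.length_map]
  rw [pyGetD_prefixSums _ _ (by omega) (by rw [hlen]; omega),
    pyGetD_prefixSums _ _ (by omega) (by rw [hlen]; omega),
    takeSum tgt lemmas _ (by omega) (by omega),
    takeSum tgt lemmas _ (by omega) (by omega)]
  have hsplit : (PySem.List.pyRange 0 (min (lemmas.length : Int) (j + window + 1))).countP
        (fun i => tgt (PySem.List.pyGetD lemmas i ""))
      = (PySem.List.pyRange 0 (max 0 (j - window))).countP
          (fun i => tgt (PySem.List.pyGetD lemmas i ""))
        + (PySem.List.pyRange (max 0 (j - window)) (min (lemmas.length : Int) (j + window + 1))).countP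
          (fun i => tgt (PySem.List.pyGetD lemmas i "")) := by
    rw [PySem.List.pyRange_one_append 0 (max 0 (j - window))
      (min (lemmas.length : Int) (j + window + 1)) (by omega) (by omega), List.countP_append]
  have hmid := winL_countP_split (fun i => tgt (PySem.List.pyGetD lemmas i ""))
    (lemmas.length : Int) window j h0 hn hlt
  have hind : PySem.List.pyGetD (lemmas.map (fun w => if tgt w then (1 : Int) else 0)) j 0
      = (if tgt (PySem.List.pyGetD lemmas j "") then (1 : Int) else 0) := by
    have := PySem.List.pyGetD_map (fun w => if tgt w then (1 : Int) else 0) lemmas j ""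
    rw [h00] at this
    rw [← this]
    rfl
  rw [hsplit, hind]
  unfold cntN
  have hcw : (winL ((lemmas.length : Int)) window j).countP
      (fun i => tgt (wAt lemmas i))
      = (winL ((lemmas.length : Int)) window j).countP
      (fun i => tgt (PySem.List.pyGetD lemmas i "")) := rfl
  rw [hcw, hmid]
  cases hp : tgt (PySem.List.pyGetD lemmas j "") <;> simp [hp] <;> push_cast <;> omega

theorem cntN_zero_of_empty (tgt : String → Bool) (lemmas : List String) (window j : Int)
    (h : min ((lemmas.length : Int)) (j + window + 1) ≤ max 0 (j - window)) :
    cntN tgt lemmas window j = 0 := by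
  unfold cntN winL
  rw [PySem.List.pyRange_one_eq_nil h]
  rfl

theorem pairfold_splitB (loF hiF cPF cIF : Int → Int) (l : List (Int × String)) :
    ∀ d1 d2 : PySem.Dict String Int,
      l.foldl (fun acc jw =>
        if loF jw.1 < hiF jw.1 then
          let acc1 := if cPF jw.1 ≠ 0 then (acc.1.modify jw.2 0 (· + cPF jw.1), acc.2) else acc
          if cIF jw.1 ≠ 0 then (acc1.1, acc1.2.modify jw.2 0 (· + cIF jw.1)) else acc1
        else acc) (d1, d2)
      = (l.foldl (fun d jw =>
            if loF jw.1 < hiF jw.1 then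
              (if cPF jw.1 ≠ 0 then d.modify jw.2 0 (· + cPF jw.1) else d) else d) d1,
         l.foldl (fun d jw =>
            if loF jw.1 < hiF jw.1 then
              (if cIF jw.1 ≠ 0 then d.modify jw.2 0 (· + cIF jw.1) else d) else d) d2) := by
  induction l with
  | nil => intro d1 d2; rfl
  | cons x t ih =>
    intro d1 d2
    simp only [List.foldl_cons]
    split_ifs <;> exact ih _ _

theorem sideB_port (tgt : String → Bool) (h00 : tgt "" = false) (lemmas : List String)
    (window : Int) (d : PySem.Dict String Int) :
    (PySem.List.enumerate lemmas).foldl (fun d jw =>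
        if max 0 (jw.1 - window) < min (PySem.List.len lemmas) (jw.1 + window + 1) then
          (if (PySem.List.pyGetD (prefixSums (lemmas.map (fun w => if tgt w then (1 : Int) else 0)))
                (min (PySem.List.len lemmas) (jw.1 + window + 1)) 0
              - PySem.List.pyGetD (prefixSums (lemmas.map (fun w => if tgt w then (1 : Int) else 0)))
                (max 0 (jw.1 - window)) 0
              - PySem.List.pyGetD (lemmas.map (fun w => if tgt w then (1 : Int) else 0)) jw.1 0) ≠ 0
           then d.modify jw.2 0 (· + (PySem.List.pyGetD (prefixSums (lemmas.map (fun w => if tgt w then (1 : Int) else 0)))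
                (min (PySem.List.len lemmas) (jw.1 + window + 1)) 0
              - PySem.List.pyGetD (prefixSums (lemmas.map (fun w => if tgt w then (1 : Int) else 0)))
                (max 0 (jw.1 - window)) 0
              - PySem.List.pyGetD (lemmas.map (fun w => if tgt w then (1 : Int) else 0)) jw.1 0))
           else d)
        else d) d
      = sideB tgt lemmas window d := by
  unfold sideB
  rw [PySem.List.enumerate_eq_map_pyRange lemmas "", List.foldl_map]
  simp only [PySem.List.len_eq]
  apply PySem.List.foldl_congr_mem
  intro acc j hj
  obtain ⟨hj0, hjn⟩ := PySem.List.mem_pyRange_one.mp hj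
  by_cases hlt : max 0 (j - window) < min ((lemmas.length : Int)) (j + window + 1)
  · rw [if_pos hlt, cnt_arith tgt h00 lemmas window j hj0 hjn hlt]
    by_cases hc : cntN tgt lemmas window j = 0
    · rw [hc]
      simp
    · rw [if_pos (by exact_mod_cast hc), if_pos hc]
      rfl
  · rw [if_neg hlt,
      if_neg (by rw [cntN_zero_of_empty tgt lemmas window j (by omega)]; simp)]

theorem docStepB_split (window : Int) (d1 d2 : PySem.Dict String Int) (lemmas : List String) :
    docStepB window (d1, d2) lemmas = (sideB tgtP lemmas window d1, sideB tgtI lemmas window d2) := by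
  have hpal : PySem.Set.ofList palWords = palWords := set_ofList_of_nodup (by decide)
  have hisr : PySem.Set.ofList israWords = israWords := set_ofList_of_nodup (by decide)
  unfold docStepB
  simp only [hpal, hisr, PySem.Set.contains]
  rw [pairfold_splitB (fun i => max 0 (i - window))
    (fun i => min (PySem.List.len lemmas) (i + window + 1))
    (fun i => PySem.List.pyGetD (prefixSums (lemmas.map (fun w => if palWords.contains w then (1 : Int) else 0)))
        (min (PySem.List.len lemmas) (i + window + 1)) 0
      - PySem.List.pyGetD (prefixSums (lemmas.map (fun w => if palWords.contains w then (1 : Int) else 0)))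
        (max 0 (i - window)) 0
      - PySem.List.pyGetD (lemmas.map (fun w => if palWords.contains w then (1 : Int) else 0)) i 0)
    (fun i => PySem.List.pyGetD (prefixSums (lemmas.map (fun w => if israWords.contains w then (1 : Int) else 0)))
        (min (PySem.List.len lemmas) (i + window + 1)) 0
      - PySem.List.pyGetD (prefixSums (lemmas.map (fun w => if israWords.contains w then (1 : Int) else 0)))
        (max 0 (i - window)) 0
      - PySem.List.pyGetD (lemmas.map (fun w => if israWords.contains w then (1 : Int) else 0)) i 0)
    (PySem.List.enumerate lemmas) d1 d2]
  rw [sideB_port (fun w => palWords.contains w) (by decide) lemmas window d1,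
    sideB_port (fun w => israWords.contains w) (by decide) lemmas window d2]
  rfl

theorem pre_sep (docs : List (List String)) (window : Int)
    (hpre : Pre_contextual_asymmetry docs window) (lemmas : List String) (h : lemmas ∈ docs) :
    SepSide tgtP lemmas window ∧ SepSide tgtI lemmas window := by
  constructor <;>
  · intro i1 i2 h0 h12 h2 ht1 ht2
    by_contra hw
    rw [not_lt] at hw
    refine hpre lemmas h i1 (PySem.List.mem_pyRange_one.mpr ⟨h0, by omega⟩) i2
      (PySem.List.mem_pyRange_one.mpr ⟨by omega, h2⟩) h12 (by omega) ?_
    simp only [tgtP, tgtI, wAt, List.contains_iff_mem] at ht1 ht2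
    first
    | exact Or.inl ⟨ht1, ht2⟩
    | exact Or.inr ⟨ht1, ht2⟩

theorem fold_docs (docs : List (List String)) (window : Int)
    (hpre : ∀ lemmas ∈ docs, SepSide tgtP lemmas window ∧ SepSide tgtI lemmas window) :
    ∀ d1 d2 : PySem.Dict String Int, d1.keys.Nodup → d2.keys.Nodup →
      docs.foldl (docStepA window) (d1, d2) = docs.foldl (docStepB window) (d1, d2) := by
  induction docs with
  | nil => intro _ _ _ _; rfl
  | cons lemmas t ih =>
    intro d1 d2 h1 h2
    have hsep := hpre lemmas (List.mem_cons_self)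
    rw [List.foldl_cons, List.foldl_cons, docStepA_split, docStepB_split,
      ← side_main tgtP lemmas window d1 hsep.1 h1, ← side_main tgtI lemmas window d2 hsep.2 h2]
    exact ih (fun l hl => hpre l (List.mem_cons_of_mem _ hl)) _ _
      (sideA_nodup tgtP lemmas window d1 h1) (sideA_nodup tgtI lemmas window d2 h2)

-- ===== VERDICT (by name: the statement is the Claim_ definition above) =====
theorem contextual_asymmetry_spec : Claim_equal_contextual_asymmetry := by
  intro docs window _ hpre
  unfold Spec_contextual_asymmetry contextual_asymmetry contextual_asymmetry_alt
  rw [fold_docs docs window (fun l hl => pre_sep docs window hpre l hl)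
    PySem.Dict.empty PySem.Dict.empty (by simp [PySem.Dict.empty, PySem.Dict.keys])
    (by simp [PySem.Dict.empty, PySem.Dict.keys])]
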